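-- pv_equiv track=rewrite | github.com/Deiadara/CPA-Implementation | CPA.py | compute_K
-- ===== SOURCE A (Python) =====
-- import collections
--
-- def minimum_m_level_ordering_exists(adj: dict[int, set[int]], dealer_id: int, m: int) -> bool:
--     # Algorithm from CPAjournal.pdf: existence check of a minimum m-level ordering
--     counters = {v: 0 for v in adj}
--     q = collections.deque()
--     enqueued = set()
--
--     # Step 2: enqueue dealer and all its neighbors
--     q.append(dealer_id)
--     enqueued.add(dealer_id)
--     for nb in adj.get(dealer_id, set()):
--         if nb not in enqueued:
--             q.append(nb)
--             enqueued.add(nb)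
--
--     # Steps 3-4: process
--     while q:
--         u = q.popleft()
--         for v in adj.get(u, set()):
--             counters[v] += 1
--             if v not in enqueued and counters[v] >= m:
--                 q.append(v)
--                 enqueued.add(v)
--
--     # Step 5: all nodes must have been enqueued
--     return len(enqueued) == len(adj)
--
-- def compute_K(adj: dict[int, set[int]], dealer_id: int) -> int:
--     # K(G,D) = max m in N such that a minimum m-level ordering exists
--     # Monotone in m, so increase until it fails
--     n = len(adj)
--     last_ok = 0
--     for m in range(0, n + 1):
--         if minimum_m_level_ordering_exists(adj, dealer_id, m):
--             last_ok = m
--         else: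
--             break
--     return last_ok
-- ===== SOURCE B (Python) =====
-- def compute_K(adj: dict[int, set[int]], dealer_id: int) -> int:
--     # Binary search on m (the check is monotone in m) with a saturation /
--     # fixpoint existence check instead of A's counter-incrementing queue BFS.
--     n = len(adj)
--
--     def reaches_all(m: int) -> bool:
--         # least set containing the dealer and its neighbours and closed under
--         # "in-degree from the set (with multiplicity) >= m"
--         S = {dealer_id}
--         S |= adj.get(dealer_id, set())
--         grown = True
--         while grown:
--             grown = False
--             for v in adj:
--                 if v not in S and sum(1 for u in S for w in adj.get(u, set()) if w == v) >= m:
--                     S.add(v)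
--                     grown = True
--         return len(S) == n
--
--     ans, lo, hi = 0, 1, n
--     while lo <= hi:
--         mid = (lo + hi) // 2
--         if reaches_all(mid):
--             ans, lo = mid, mid + 1
--         else:
--             hi = mid - 1
--     return ans
-- ===== Notes on version B (the rewrite author's own statement) =====
-- stated objective: alternative
-- what changed: B replaces both layers of A: the linear upward scan over m = 0..n becomes a binary search on m (correct because the existence check is monotone in m, proved in Lean), and A's counter-incrementing queue BFS existence check becomes a saturation/fixpoint iteration that repeatedly rescans all keys, recomputing each node's weighted in-degree from the current set, until nothing changes; the saturation check does more work per call, so B is not measurably faster.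
-- outside the precondition, e.g. on compute_K({1: set(), 2: {99}}, 1): A returns 0, B returns 0
import Mathlib
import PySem

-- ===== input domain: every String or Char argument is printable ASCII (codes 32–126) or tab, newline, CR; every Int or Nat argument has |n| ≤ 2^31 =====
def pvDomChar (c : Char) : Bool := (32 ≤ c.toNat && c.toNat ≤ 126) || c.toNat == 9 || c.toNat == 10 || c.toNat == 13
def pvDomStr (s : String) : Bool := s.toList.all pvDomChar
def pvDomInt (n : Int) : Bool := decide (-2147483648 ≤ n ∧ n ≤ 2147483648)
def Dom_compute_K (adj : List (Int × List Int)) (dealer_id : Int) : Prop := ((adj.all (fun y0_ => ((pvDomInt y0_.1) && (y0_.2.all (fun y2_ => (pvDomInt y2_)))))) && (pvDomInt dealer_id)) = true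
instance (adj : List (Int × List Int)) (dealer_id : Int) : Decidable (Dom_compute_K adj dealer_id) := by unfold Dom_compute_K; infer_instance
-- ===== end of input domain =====

-- B replaces A's linear scan over m by a binary search on m, and A's queue
-- BFS existence check by a saturation/fixpoint iteration; same return value
-- on all of Pre_ (the check is monotone in m and both checks compute the
-- same least closed set — proved below).

-- ===== PORT A =====
-- Python helper minimum_m_level_ordering_exists (counter BFS with a queue).
-- State = (counters, q, enqueued); the Python set `enqueued` is kept as its
-- distinct-element list (PySem.Set).
-- Inner `for v in adj.get(u, set())` loop of the helper:
def mlexInner (m : Int) : List Int → (PySem.Dict Int Int × List Int × List Int) → Option (PySem.Dict Int Int × List Int × List Int)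
  | [], st => some st
  | v :: vs, (c, q, e) =>
    match c.get? v with
    | none => none   -- counters[v] += 1 raises KeyError
    | some cv =>
      if e.contains v = false ∧ m ≤ cv + 1 then
        mlexInner m vs (c.insert v (cv + 1), q ++ [v], e ++ [v])
      else
        mlexInner m vs (c.insert v (cv + 1), q, e)

-- `while q:` loop of the helper (fuel is not in the Python: it is never
-- exhausted on any input the helper terminates on, see mlexLoop_spec)
def mlexLoop (D : PySem.Dict Int (List Int)) (m : Int) : Nat → (PySem.Dict Int Int × List Int × List Int) → Option (PySem.Dict Int Int × List Int × List Int)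
  | _, (c, [], e) => some (c, [], e)
  | 0, _ => none
  | fuel + 1, (c, u :: q, e) =>
    match mlexInner m (D.getD u []) (c, q, e) with
    | none => none
    | some st => mlexLoop D m fuel st

def mlex (adj : List (Int × List Int)) (dealer_id m : Int) : Option Bool :=
  let D := PySem.Dict.ofList adj
  let c0 := D.keys.foldl (fun c v => c.insert v (0 : Int)) PySem.Dict.empty
  let nb0 := D.getD dealer_id []
  let st0 := nb0.foldl (fun (p : List Int × List Int) nb => if p.2.contains nb then p else (p.1 ++ [nb], p.2 ++ [nb])) ([dealer_id], [dealer_id])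
  match mlexLoop D m (1 + nb0.length + D.size) (c0, st0.1, st0.2) with
  | none => none
  | some (_, _, e) => some (decide (e.length = D.size))

-- `for m in range(0, n + 1): … else break` loop of A
def computeKScan (adj : List (Int × List Int)) (dealer_id : Int) : List Int → Int → Int
  | [], last_ok => last_ok
  | m :: ms, last_ok =>
    match mlex adj dealer_id m with
    | none => last_ok                -- KeyError would propagate; outside Pre_
    | some b => if b then computeKScan adj dealer_id ms m else last_ok

def compute_K (adj : List (Int × List Int)) (dealer_id : Int) : Int :=
  let n : Int := (PySem.Dict.ofList adj).size
  computeKScan adj dealer_id (PySem.List.pyRange 0 (n + 1) 1) 0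

-- ===== PORT B =====
-- Source B's `sum(1 for u in S for w in adj.get(u, set()) if w == v)`
def bwdeg (D : PySem.Dict Int (List Int)) (S : List Int) (v : Int) : Int :=
  S.foldl (fun acc u => acc + (((D.getD u [] : List Int).count v : Int))) 0

-- `for v in adj:` body of Source B's saturation pass (state = (S, grown))
def satPass (D : PySem.Dict Int (List Int)) (m : Int) : List Int → PySem.Set Int × Bool → PySem.Set Int × Bool
  | [], st => st
  | v :: vs, (S, g) =>
    if S.contains v = false ∧ m ≤ bwdeg D S v then
      satPass D m vs (PySem.Set.add S v, true)
    else satPass D m vs (S, g)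

-- `while grown:` loop of Source B (fuel is not in the Python: D.size + 1 rounds
-- always suffice since every growing round adds at least one key)
def satLoop (D : PySem.Dict Int (List Int)) (m : Int) : Nat → PySem.Set Int → PySem.Set Int
  | 0, S => S
  | fuel + 1, S =>
    match satPass D m D.keys (S, false) with
    | (S', true) => satLoop D m fuel S'
    | (S', false) => S'

-- Source B's reaches_all(m)
def reachesAll (adj : List (Int × List Int)) (dealer_id m : Int) : Bool :=
  let D := PySem.Dict.ofList adj
  let S0 : PySem.Set Int := PySem.Set.update [dealer_id] (D.getD dealer_id [])
  let S := satLoop D m (D.size + 1) S0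
  decide (S.length = D.size)

-- `while lo <= hi:` binary-search loop of Source B
def computeKBin (adj : List (Int × List Int)) (dealer_id lo hi ans : Int) : Int :=
  if h : lo ≤ hi then
    let mid := PySem.Int.floordiv (lo + hi) 2
    if reachesAll adj dealer_id mid then computeKBin adj dealer_id (mid + 1) hi mid
    else computeKBin adj dealer_id lo (mid - 1) ans
  else ans
termination_by (hi + 1 - lo).toNat
decreasing_by
  · have := PySem.Int.floordiv_two_mid_bounds h; omega
  · have := PySem.Int.floordiv_two_mid_bounds h; omega

def compute_K_alt (adj : List (Int × List Int)) (dealer_id : Int) : Int :=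
  let n : Int := (PySem.Dict.ofList adj).size
  computeKBin adj dealer_id 1 n 0

-- ===== PRECONDITION & SPEC =====
-- Pre_ admits every input whose dealer is not a key of adj (then the helper
-- processes nothing and A always returns) and every input all of whose listed
-- neighbours are keys of adj; it excludes the remaining inputs, where
-- `counters[v] += 1` in A's helper raises KeyError whenever a non-key
-- neighbour is reached (A propagates the exception on most of them and only
-- returns when every bad neighbour happens to be unreachable).
def Pre_compute_K (adj : List (Int × List Int)) (dealer_id : Int) : Prop :=
  (adj.any (fun p => p.1 == dealer_id)) = false ∨
  (adj.all (fun p => p.2.all (fun v => adj.any (fun q => q.1 == v)))) = true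
instance (adj : List (Int × List Int)) (dealer_id : Int) : Decidable (Pre_compute_K adj dealer_id) := by unfold Pre_compute_K; infer_instance

def pvWitness_compute_K : (List (Int × List Int)) × Int := ([(0, [1]), (1, [0]), (2, [0, 1])], 0)

def Spec_compute_K (adj : List (Int × List Int)) (dealer_id : Int) (out : Int) : Prop := out = compute_K_alt adj dealer_id
instance (adj : List (Int × List Int)) (dealer_id : Int) (out : Int) : Decidable (Spec_compute_K adj dealer_id out) := by unfold Spec_compute_K; infer_instance

-- ===== CLAIM (what is proved, stated in full; the proofs are below) =====
def Claim_equal_compute_K : Prop := ∀ (adj : List (Int × List Int)) (dealer_id : Int), Dom_compute_K adj dealer_id → Pre_compute_K adj dealer_id → Spec_compute_K adj dealer_id (compute_K adj dealer_id)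

-- ===== LEMMAS AND PROOFS =====

-- Proof-only notions ------------------------------------------------------

-- weighted in-degree of v from the node list S
def wdeg (D : PySem.Dict Int (List Int)) (S : List Int) (v : Int) : Nat :=
  (S.map (fun u => (D.getD u []).count v)).sum

-- every listed neighbour of a key is a key
def GoodD (D : PySem.Dict Int (List Int)) : Prop :=
  ∀ u ∈ D.keys, ∀ v ∈ (D.getD u [] : List Int), v ∈ D.keys

lemma wdeg_nil (D : PySem.Dict Int (List Int)) (v : Int) : wdeg D [] v = 0 := rfl

lemma wdeg_append (D : PySem.Dict Int (List Int)) (S T : List Int) (v : Int) :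
    wdeg D (S ++ T) v = wdeg D S v + wdeg D T v := by
  simp [wdeg]

lemma wdeg_pos (D : PySem.Dict Int (List Int)) (S : List Int) (v : Int)
    (h : 1 ≤ wdeg D S v) : ∃ u ∈ S, v ∈ (D.getD u [] : List Int) := by
  by_contra hc
  push Not at hc
  have h0 : wdeg D S v = 0 := by
    unfold wdeg
    apply List.sum_eq_zero
    intro x hx
    obtain ⟨u, hu, rfl⟩ := List.mem_map.1 hx
    exact List.count_eq_zero.2 (hc u hu)
  omega

lemma wdeg_singleton (D : PySem.Dict Int (List Int)) (u v : Int) :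
    wdeg D [u] v = (D.getD u []).count v := by simp [wdeg]

lemma wdeg_mono (D : PySem.Dict Int (List Int)) {S T : List Int} (v : Int)
    (hS : S.Nodup) (hsub : S ⊆ T) : wdeg D S v ≤ wdeg D T v := by
  obtain ⟨l, hp, hsl⟩ := hS.subperm hsub
  unfold wdeg
  calc (S.map (fun u => (D.getD u []).count v)).sum
      = (l.map (fun u => (D.getD u []).count v)).sum := ((hp.map _).sum_eq).symm
    _ ≤ (T.map (fun u => (D.getD u []).count v)).sum := (hsl.map _).sum_le_sum (by simp)

-- bwdeg (B's generator sum) is wdeg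
lemma bwdeg_eq (D : PySem.Dict Int (List Int)) (S : List Int) (v : Int) :
    bwdeg D S v = (wdeg D S v : Int) := by
  have key : ∀ (S : List Int) (a : Int),
      S.foldl (fun acc u => acc + (((D.getD u [] : List Int).count v : Int))) a
        = a + ((wdeg D S v : Nat) : Int) := by
    intro S
    induction S with
    | nil => intro a; simp [wdeg_nil]
    | cons u S ih =>
      intro a
      have h1 : wdeg D (u :: S) v = (D.getD u []).count v + wdeg D S v := by
        simp [wdeg]
      rw [List.foldl_cons, ih, h1]
      push_cast
      ring
  have := key S 0
  rw [bwdeg, this]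
  ring

lemma nodup_subset_length {S T : List Int} (hS : S.Nodup) (hsub : S ⊆ T) :
    S.length ≤ T.dedup.length := by
  have h1 : List.Subperm S T.dedup := hS.subperm (fun x hx => List.mem_dedup.2 (hsub hx))
  exact h1.length_le

lemma nodup_subset_length_ge {S T : List Int} (hS : S.Nodup) (hT : T.Nodup)
    (hsub : S ⊆ T) (hl : T.length ≤ S.length) : T ⊆ S := by
  have h1 : List.Subperm S T := hS.subperm hsub
  exact (h1.perm_of_length_le hl).symm.subset

lemma nodup_mutual_length {S T : List Int} (hS : S.Nodup) (hT : T.Nodup)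
    (h1 : S ⊆ T) (h2 : T ⊆ S) : S.length = T.length := by
  have hA : List.Subperm S T := hS.subperm h1
  have hB : List.Subperm T S := hT.subperm h2
  exact le_antisymm hA.length_le hB.length_le

-- dict plumbing -----------------------------------------------------------

lemma get?_foldl_insert_pairs (ps : List (Int × List Int)) :
    ∀ (d : PySem.Dict Int (List Int)) (k : Int) (vs : List Int),
      (ps.foldl (fun d p => d.insert p.1 p.2) d).get? k = some vs →
      (k, vs) ∈ ps ∨ d.get? k = some vs := by
  induction ps with
  | nil => intro d k vs h; exact Or.inr h
  | cons p ps ih =>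
    intro d k vs h
    rcases ih _ _ _ h with h1 | h1
    · exact Or.inl (List.mem_cons_of_mem _ h1)
    · rw [PySem.Dict.get?_insert] at h1
      by_cases hk : k = p.1
      · subst hk
        simp only [if_pos] at h1
        refine Or.inl ?_
        have : (p.1, vs) = p := by
          rcases p with ⟨p1, p2⟩
          simp_all
        rw [this]; exact List.mem_cons_self
      · rw [if_neg hk] at h1; exact Or.inr h1

lemma get?_ofList_mem (adj : List (Int × List Int)) (k : Int) (vs : List Int)
    (h : (PySem.Dict.ofList adj).get? k = some vs) : (k, vs) ∈ adj := by
  rcases get?_foldl_insert_pairs adj PySem.Dict.empty k vs h with h1 | h1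
  · exact h1
  · rw [PySem.Dict.get?_empty] at h1; cases h1

lemma keys_ofList_mem (adj : List (Int × List Int)) (k : Int) :
    k ∈ (PySem.Dict.ofList adj).keys ↔ k ∈ adj.map (·.1) := by
  show k ∈ (adj.foldl (fun acc p => acc.insert p.1 p.2) PySem.Dict.empty).keys ↔ _
  rw [PySem.Dict.keys_foldl_insert_key adj Prod.fst (fun _ p => p.2) PySem.Dict.empty,
    PySem.Dict.keys_empty, PySem.Set.update_nil_left, PySem.Set.mem_ofList]

lemma pre_goodD (adj : List (Int × List Int)) (dealer_id : Int)
    (h : (adj.all (fun p => p.2.all (fun v => adj.any (fun q => q.1 == v)))) = true) :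
    GoodD (PySem.Dict.ofList adj) := by
  intro u hu v hv
  rcases hg : (PySem.Dict.ofList adj).get? u with _ | vs
  · rw [PySem.Dict.getD_eq_get?_getD, hg] at hv; cases hv
  · rw [PySem.Dict.getD_eq_get?_getD, hg] at hv
    have hmem : (u, vs) ∈ adj := get?_ofList_mem adj u vs hg
    rw [List.all_eq_true] at h
    have h2 := h _ hmem
    rw [List.all_eq_true] at h2
    have h3 := h2 _ hv
    rw [List.any_eq_true] at h3
    obtain ⟨q, hq, hbeq⟩ := h3
    rw [keys_ofList_mem]
    exact List.mem_map.2 ⟨q, hq, by simpa using hbeq⟩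

lemma getD_of_not_key (D : PySem.Dict Int (List Int)) (u : Int)
    (h : u ∉ D.keys) : D.getD u [] = ([] : List Int) := by
  apply PySem.Dict.getD_of_not_contains
  rw [PySem.Dict.contains_eq_decide_mem_keys]
  simpa using h

lemma c0_keys (K : List Int) (hK : K.Nodup) :
    (K.foldl (fun c v => c.insert v (0 : Int)) PySem.Dict.empty).keys = K := by
  rw [PySem.Dict.keys_foldl_insert K (fun _ _ => (0 : Int)) PySem.Dict.empty,
    PySem.Dict.keys_empty, PySem.Set.update_nil_left,
    PySem.Set.ofList_eq_self_of_nodup K hK]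

lemma c0_getD (K : List Int) (v : Int) :
    (K.foldl (fun c v => c.insert v (0 : Int)) PySem.Dict.empty).getD v 0 = 0 := by
  have : ∀ (d : PySem.Dict Int Int), d.getD v 0 = 0 →
      (K.foldl (fun c v => c.insert v (0 : Int)) d).getD v 0 = 0 := by
    induction K with
    | nil => intro d hd; exact hd
    | cons k K ih =>
      intro d hd
      exact ih _ (by rw [PySem.Dict.getD_insert]; split <;> simp [hd])
  exact this _ (by simp [PySem.Dict.getD_empty])

-- A's inner neighbour loop ------------------------------------------------

lemma mlexInner_spec (m : Int) :
    ∀ (vs : List Int) (c : PySem.Dict Int Int) (q e : List Int),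
      (∀ v ∈ vs, c.contains v = true) →
      ∃ c' new,
        mlexInner m vs (c, q, e) = some (c', q ++ new, e ++ new) ∧
        c'.keys = c.keys ∧
        (∀ v, c'.getD v 0 = c.getD v 0 + (vs.count v : Int)) ∧
        (e.Nodup → (e ++ new).Nodup) ∧
        (∀ v ∈ new, v ∈ vs ∧ v ∉ e ∧ c.contains v = true) ∧
        new.Nodup ∧
        (∀ v ∈ new, m ≤ c.getD v 0 + (vs.count v : Int)) ∧
        (∀ v ∈ vs, v ∉ e ++ new → c.getD v 0 + (vs.count v : Int) < m) := by
  intro vs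
  induction vs with
  | nil =>
    intro c q e _
    exact ⟨c, [], by simp [mlexInner], rfl, by simp, by simp, by simp, by simp,
      by simp, by simp⟩
  | cons v vs ih =>
    intro c q e h
    have hc : c.contains v = true := h v List.mem_cons_self
    obtain ⟨cv, hcv⟩ : ∃ cv, c.get? v = some cv := by
      rw [PySem.Dict.contains_eq_isSome_get?] at hc
      exact Option.isSome_iff_exists.1 hc
    have hgetv : c.getD v 0 = cv := PySem.Dict.getD_of_get?_eq_some c 0 hcv
    have hkeys1 : (c.insert v (cv + 1)).keys = c.keys :=
      PySem.Dict.keys_insert_of_contains c (cv + 1) hc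
    have hcont1 : ∀ w, (c.insert v (cv + 1)).contains w = true → c.contains w = true := by
      intro w hw
      rw [PySem.Dict.contains_insert] at hw
      rcases Bool.or_eq_true_iff.1 hw with hw | hw
      · have : w = v := by simpa using hw
        subst this; exact hc
      · exact hw
    have hcont2 : ∀ w ∈ vs, (c.insert v (cv + 1)).contains w = true := by
      intro w hw
      rw [PySem.Dict.contains_insert, Bool.or_eq_true_iff]
      exact Or.inr (h w (List.mem_cons_of_mem _ hw))
    have hget1 : ∀ w, (c.insert v (cv + 1)).getD w 0 = if w = v then cv + 1 else c.getD w 0 := by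
      intro w; rw [PySem.Dict.getD_insert]
    have hcount : ∀ w, ((v :: vs).count w : Int) = (vs.count w : Int) + if w = v then 1 else 0 := by
      intro w
      rw [List.count_cons]
      by_cases hw : w = v
      · subst hw; simp
      · have hbv : (v == w) = false := beq_eq_false_iff_ne.2 (Ne.symm hw)
        rw [hbv, if_neg hw]
        simp
    by_cases hcond : e.contains v = false ∧ m ≤ cv + 1
    · -- v is enqueued now
      have hve : v ∉ e := by simpa using hcond.1
      obtain ⟨c', new', heq, hk, hgd, hnd, hmem, hndn, hsnd, hcmp⟩ :=
        ih (c.insert v (cv + 1)) (q ++ [v]) (e ++ [v]) hcont2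
      refine ⟨c', v :: new', ?_, ?_, ?_, ?_, ?_, ?_, ?_, ?_⟩
      · show mlexInner m (v :: vs) (c, q, e) = _
        rw [mlexInner, hcv]
        simp only [hcond, and_self, if_true]
        rw [heq]
        simp
      · rw [hk, hkeys1]
      · intro w
        rw [hgd w, hget1 w, hcount w]
        by_cases hw : w = v
        · subst hw; rw [if_pos rfl, if_pos rfl, hgetv]; ring
        · rw [if_neg hw, if_neg hw]; ring
      · intro he
        have : (e ++ [v]).Nodup := by
          rw [List.nodup_append]
          refine ⟨he, List.nodup_singleton v, ?_⟩
          intro a ha b hb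
          rw [List.mem_singleton] at hb
          exact fun hab => hve ((hab.trans hb) ▸ ha)
        have := hnd this
        simpa using this
      · intro w hw
        rcases List.mem_cons.1 hw with hw | hw
        · subst hw; exact ⟨List.mem_cons_self, hve, hc⟩
        · obtain ⟨h1, h2, h3⟩ := hmem w hw
          exact ⟨List.mem_cons_of_mem _ h1, fun hwe => h2 (by simp [hwe]), hcont1 w h3⟩
      · rw [List.nodup_cons]
        exact ⟨fun hvnew => (hmem v hvnew).2.1 (by simp), hndn⟩
      · intro w hw
        rcases List.mem_cons.1 hw with hw | hw
        · subst hw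
          rw [hgetv, hcount w, if_pos rfl]
          have : (0 : Int) ≤ (vs.count w : Int) := Int.natCast_nonneg _
          omega
        · have := hsnd w hw
          rw [hget1 w, hcount w] at *
          by_cases hwv : w = v
          · subst hwv; rw [if_pos rfl] at this ⊢; rw [hgetv]; omega
          · rw [if_neg hwv] at this ⊢; omega
      · intro w hw hnotin
        have hwnv : w ≠ v := by
          intro hwv; subst hwv
          exact hnotin (by simp)
        have hwvs : w ∈ vs := by
          rcases List.mem_cons.1 hw with h1 | h1
          · exact absurd h1 hwnv
          · exact h1
        have hnot2 : w ∉ (e ++ [v]) ++ new' := by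
          intro hmem2
          apply hnotin
          simp only [List.append_assoc, List.mem_append] at hmem2 ⊢
          rcases hmem2 with h1 | h1
          · exact Or.inl h1
          · simp only [List.mem_cons] at h1
            exact Or.inr (by simpa using h1)
        have := hcmp w hwvs hnot2
        rw [hget1 w, if_neg hwnv] at this
        rw [hcount w, if_neg hwnv]
        omega
    · -- v is not enqueued now
      obtain ⟨c', new', heq, hk, hgd, hnd, hmem, hndn, hsnd, hcmp⟩ :=
        ih (c.insert v (cv + 1)) q e hcont2
      refine ⟨c', new', ?_, ?_, ?_, hnd, ?_, hndn, ?_, ?_⟩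
      · show mlexInner m (v :: vs) (c, q, e) = _
        rw [mlexInner, hcv]
        simp only [hcond, if_false]
        exact heq
      · rw [hk, hkeys1]
      · intro w
        rw [hgd w, hget1 w, hcount w]
        by_cases hw : w = v
        · subst hw; rw [if_pos rfl, if_pos rfl, hgetv]; ring
        · rw [if_neg hw, if_neg hw]; ring
      · intro w hw
        obtain ⟨h1, h2, h3⟩ := hmem w hw
        exact ⟨List.mem_cons_of_mem _ h1, h2, hcont1 w h3⟩
      · intro w hw
        have := hsnd w hw
        rw [hget1 w] at this
        rw [hcount w]
        by_cases hwv : w = v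
        · subst hwv; rw [if_pos rfl] at this ⊢; rw [hgetv]; omega
        · rw [if_neg hwv] at this ⊢; omega
      · intro w hw hnotin
        rw [hcount w]
        by_cases hwv : w = v
        · subst hwv
          rw [if_pos rfl, hgetv]
          have hwe : w ∉ e := fun h1 => hnotin (List.mem_append.2 (Or.inl h1))
          have hmle : ¬ m ≤ cv + 1 := by
            intro hm
            exact hcond ⟨by simpa using hwe, hm⟩
          by_cases hwvs : w ∈ vs
          · have := hcmp w hwvs hnotin
            rw [hget1 w, if_pos rfl] at this
            omega
          · have : vs.count w = 0 := List.count_eq_zero.2 hwvs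
            rw [this]
            push_cast
            omega
        · rw [if_neg hwv]
          have hwvs : w ∈ vs := by
            rcases List.mem_cons.1 hw with h1 | h1
            · exact absurd h1 hwv
            · exact h1
          have := hcmp w hwvs hnotin
          rw [hget1 w, if_neg hwv] at this
          omega

-- A's while loop ----------------------------------------------------------

lemma mlexLoop_spec (D : PySem.Dict Int (List Int)) (m : Int) (dealer : Int)
    (hG : GoodD D) (T : List Int)
    (hTc : ∀ v, (max m 1 : Int) ≤ (wdeg D T v : Int) → v ∈ T) :
    ∀ (fuel : Nat) (c : PySem.Dict Int Int) (q e p : List Int),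
      e = p ++ q →
      e.Nodup →
      (∀ x ∈ e, x = dealer ∨ x ∈ D.keys) →
      c.keys = D.keys →
      (∀ v, c.getD v 0 = (wdeg D p v : Int)) →
      (∀ v, v ∉ e → (wdeg D p v : Int) < max m 1) →
      (∀ x ∈ e, x ∈ T) →
      (dealer :: D.keys).dedup.length ≤ fuel + p.length →
      ∃ c' e',
        mlexLoop D m fuel (c, q, e) = some (c', [], e') ∧
        (∀ x ∈ e, x ∈ e') ∧ e'.Nodup ∧
        (∀ x ∈ e', x = dealer ∨ x ∈ D.keys) ∧
        (∀ v, v ∉ e' → (wdeg D e' v : Int) < max m 1) ∧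
        (∀ x ∈ e', x ∈ T) := by
  intro fuel
  induction fuel with
  | zero =>
    intro c q e p hpe hnd hW hk hcd hcmp hT hfuel
    match q with
    | [] =>
      refine ⟨c, e, rfl, fun x hx => hx, hnd, hW, ?_, hT⟩
      intro v hv
      rw [hpe, List.append_nil] at hv ⊢ ⊢
      subst hpe
      simpa using hcmp v (by simpa using hv)
    | u :: q' =>
      exfalso
      have hsub : e ⊆ dealer :: D.keys := by
        intro x hx
        rcases hW x hx with h1 | h1
        · simp [h1]
        · exact List.mem_cons_of_mem _ h1
      have h1 := nodup_subset_length hnd hsub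
      have h2 : e.length = p.length + q'.length + 1 := by
        rw [hpe]; simp [List.length_append]; omega
      omega
  | succ fuel ih =>
    intro c q e p hpe hnd hW hk hcd hcmp hT hfuel
    match q with
    | [] =>
      refine ⟨c, e, rfl, fun x hx => hx, hnd, hW, ?_, hT⟩
      intro v hv
      rw [hpe, List.append_nil] at hv ⊢ ⊢
      subst hpe
      simpa using hcmp v (by simpa using hv)
    | u :: q' =>
      have hue : u ∈ e := by rw [hpe]; simp
      have hnbrK : ∀ v ∈ (D.getD u [] : List Int), v ∈ D.keys := by
        by_cases hu : u ∈ D.keys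
        · exact hG u hu
        · rcases hW u hue with h1 | h1
          · rw [h1, getD_of_not_key D dealer (h1 ▸ hu)]
            intro v hv; cases hv
          · exact absurd h1 hu
      have hinnerpre : ∀ v ∈ (D.getD u [] : List Int), c.contains v = true := by
        intro v hv
        rw [PySem.Dict.contains_iff_mem_keys, hk]
        exact hnbrK v hv
      obtain ⟨c₂, new, heq, hk2, hgd2, hnd2, hmem2, hndn2, hsnd2, hcmp2⟩ :=
        mlexInner_spec m (D.getD u []) c q' e hinnerpre
      have hpe' : e ++ new = (p ++ [u]) ++ (q' ++ new) := by
        rw [hpe]; simp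
      have hpu_nodup : (p ++ [u]).Nodup := by
        have hsl : (p ++ [u]).Sublist (p ++ u :: q') :=
          (List.append_sublist_append_left p).2 (by simp)
        exact (hpe ▸ hnd).sublist hsl
      have hwdeg' : ∀ v, (wdeg D (p ++ [u]) v : Int) =
          c.getD v 0 + ((D.getD u [] : List Int).count v : Int) := by
        intro v
        rw [wdeg_append, wdeg_singleton, hcd v]
        push_cast; ring
      have hnewT : ∀ x ∈ new, x ∈ T := by
        intro x hx
        have h1 := hsnd2 x hx
        obtain ⟨hxvs, _, _⟩ := hmem2 x hx
        have hcnt : 1 ≤ ((D.getD u [] : List Int).count x : Int) := by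
          exact_mod_cast List.count_pos_iff.2 hxvs
        have hmax : (max m 1 : Int) ≤ (wdeg D (p ++ [u]) x : Int) := by
          rw [hwdeg' x]
          have : (0:Int) ≤ c.getD x 0 := by rw [hcd x]; positivity
          rcases max_cases m 1 with ⟨hm, _⟩ | ⟨hm, _⟩ <;> rw [hm] <;> omega
        have hsubT : (p ++ [u]) ⊆ T := by
          intro y hy
          rcases List.mem_append.1 hy with hy | hy
          · exact hT y (by rw [hpe]; exact List.mem_append.2 (Or.inl hy))
          · rw [List.mem_singleton] at hy; exact hy ▸ hT u hue
        have hle : (wdeg D (p ++ [u]) x : Int) ≤ (wdeg D T x : Int) := by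
          exact_mod_cast wdeg_mono D x hpu_nodup hsubT
        exact hTc x (le_trans hmax hle)
      have hres := ih c₂ (q' ++ new) (e ++ new) (p ++ [u]) hpe' (hnd2 hnd)
        (by
          intro x hx
          rcases List.mem_append.1 hx with hx | hx
          · exact hW x hx
          · obtain ⟨_, _, h3⟩ := hmem2 x hx
            right
            rw [← hk, ← PySem.Dict.contains_iff_mem_keys]
            exact h3)
        (hk2.trans hk)
        (by
          intro v
          rw [hgd2 v, hwdeg' v])
        (by
          intro v hv
          have hve : v ∉ e := fun h1 => hv (List.mem_append.2 (Or.inl h1))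
          by_cases hvnb : v ∈ (D.getD u [] : List Int)
          · have h1 := hcmp2 v hvnb hv
            have hcnt : 1 ≤ ((D.getD u [] : List Int).count v : Int) := by
              exact_mod_cast List.count_pos_iff.2 hvnb
            have : (0:Int) ≤ c.getD v 0 := by rw [hcd v]; positivity
            rw [hwdeg' v]
            rcases max_cases m 1 with ⟨hm, _⟩ | ⟨hm, _⟩ <;> rw [hm] <;> omega
          · have hcnt : (D.getD u [] : List Int).count v = 0 := List.count_eq_zero.2 hvnb
            have h1 : wdeg D (p ++ [u]) v = wdeg D p v := by
              rw [wdeg_append, wdeg_singleton, hcnt]; omega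
            rw [h1]
            exact hcmp v hve)
        (by
          intro x hx
          rcases List.mem_append.1 hx with hx | hx
          · exact hT x hx
          · exact hnewT x hx)
        (by simp only [List.length_append, List.length_cons, List.length_nil]; omega)
      obtain ⟨c', e', hloop, hsub', hnd', hW', hcmp', hT'⟩ := hres
      refine ⟨c', e', ?_, ?_, hnd', hW', hcmp', hT'⟩
      · rw [mlexLoop, heq]
        exact hloop
      · intro x hx
        exact hsub' x (List.mem_append.2 (Or.inl hx))

-- A's initial enqueue loop ------------------------------------------------

lemma init_fold_spec (nbs : List Int) :
    ∀ (l : List Int), l.Nodup →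
      (nbs.foldl (fun (p : List Int × List Int) nb => if p.2.contains nb then p else (p.1 ++ [nb], p.2 ++ [nb])) (l, l)).1
        = (nbs.foldl (fun (p : List Int × List Int) nb => if p.2.contains nb then p else (p.1 ++ [nb], p.2 ++ [nb])) (l, l)).2 ∧
      (nbs.foldl (fun (p : List Int × List Int) nb => if p.2.contains nb then p else (p.1 ++ [nb], p.2 ++ [nb])) (l, l)).2.Nodup ∧
      (∀ x ∈ (nbs.foldl (fun (p : List Int × List Int) nb => if p.2.contains nb then p else (p.1 ++ [nb], p.2 ++ [nb])) (l, l)).2, x ∈ l ∨ x ∈ nbs) ∧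
      (∀ x ∈ l, x ∈ (nbs.foldl (fun (p : List Int × List Int) nb => if p.2.contains nb then p else (p.1 ++ [nb], p.2 ++ [nb])) (l, l)).2) ∧
      (∀ x ∈ nbs, x ∈ (nbs.foldl (fun (p : List Int × List Int) nb => if p.2.contains nb then p else (p.1 ++ [nb], p.2 ++ [nb])) (l, l)).2) := by
  induction nbs with
  | nil =>
    intro l hl
    exact ⟨rfl, hl, fun x hx => Or.inl hx, fun x hx => hx, by simp⟩
  | cons nb nbs ih =>
    intro l hl
    rw [List.foldl_cons]
    by_cases hc : l.contains nb = true
    · have hnb : nb ∈ l := by simpa using hc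
      rw [if_pos hc]
      obtain ⟨h1, h2, h3, h4, h5⟩ := ih l hl
      refine ⟨h1, h2, ?_, h4, ?_⟩
      · intro x hx
        rcases h3 x hx with h | h
        · exact Or.inl h
        · exact Or.inr (List.mem_cons_of_mem _ h)
      · intro x hx
        rcases List.mem_cons.1 hx with h | h
        · exact h4 x (h ▸ hnb)
        · exact h5 x h
    · have hnb : nb ∉ l := by simpa using hc
      rw [if_neg hc]
      have hl' : (l ++ [nb]).Nodup := by
        rw [List.nodup_append]
        refine ⟨hl, List.nodup_singleton nb, ?_⟩
        intro a ha b hb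
        rw [List.mem_singleton] at hb
        exact fun hab => hnb ((hab.trans hb) ▸ ha)
      obtain ⟨h1, h2, h3, h4, h5⟩ := ih (l ++ [nb]) hl'
      refine ⟨h1, h2, ?_, ?_, ?_⟩
      · intro x hx
        rcases h3 x hx with h | h
        · rcases List.mem_append.1 h with h | h
          · exact Or.inl h
          · rw [List.mem_singleton] at h
            exact Or.inr (h ▸ List.mem_cons_self)
        · exact Or.inr (List.mem_cons_of_mem _ h)
      · intro x hx
        exact h4 x (List.mem_append.2 (Or.inl hx))
      · intro x hx
        rcases List.mem_cons.1 hx with h | h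
        · exact h4 x (List.mem_append.2 (Or.inr (by simp [h])))
        · exact h5 x h

-- mlex characterisation ---------------------------------------------------

-- within Pre_, mlex returns some (|E| == n) for a final-enqueued set E with
-- the least-fixpoint properties; and E is contained in any closed T
lemma mlex_spec (adj : List (Int × List Int)) (dealer m : Int)
    (hG : GoodD (PySem.Dict.ofList adj)) (T : List Int)
    (hTd : dealer ∈ T)
    (hTn : ∀ x ∈ ((PySem.Dict.ofList adj).getD dealer [] : List Int), x ∈ T)
    (hTc : ∀ v, (max m 1 : Int) ≤ (wdeg (PySem.Dict.ofList adj) T v : Int) → v ∈ T) :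
    ∃ E : List Int,
      mlex adj dealer m = some (decide (E.length = (PySem.Dict.ofList adj).size)) ∧
      E.Nodup ∧ dealer ∈ E ∧
      (∀ x ∈ ((PySem.Dict.ofList adj).getD dealer [] : List Int), x ∈ E) ∧
      (∀ x ∈ E, x = dealer ∨ x ∈ (PySem.Dict.ofList adj).keys) ∧
      (∀ v, v ∉ E → (wdeg (PySem.Dict.ofList adj) E v : Int) < max m 1) ∧
      (∀ x ∈ E, x ∈ T) := by
  have hKnd : (PySem.Dict.ofList adj).keys.Nodup := PySem.Dict.nodup_keys_ofList adj
  obtain ⟨hq, hnd0, hmem0, hsub0, hnbsub⟩ :=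
    init_fold_spec ((PySem.Dict.ofList adj).getD dealer []) [dealer] (List.nodup_singleton dealer)
  have hWnb : ∀ x ∈ ((PySem.Dict.ofList adj).getD dealer [] : List Int),
      x = dealer ∨ x ∈ (PySem.Dict.ofList adj).keys := by
    by_cases hdk : dealer ∈ (PySem.Dict.ofList adj).keys
    · intro x hx; exact Or.inr (hG dealer hdk x hx)
    · rw [getD_of_not_key _ dealer hdk]; intro x hx; cases hx
  obtain ⟨c', e', hloop, hsub', hnd', hW', hcmp', hT'⟩ :=
    mlexLoop_spec (PySem.Dict.ofList adj) m dealer hG T hTc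
      (1 + ((PySem.Dict.ofList adj).getD dealer [] : List Int).length + (PySem.Dict.ofList adj).size)
      ((PySem.Dict.ofList adj).keys.foldl (fun c v => c.insert v (0 : Int)) PySem.Dict.empty)
      (((PySem.Dict.ofList adj).getD dealer [] : List Int).foldl
        (fun (p : List Int × List Int) nb => if p.2.contains nb then p else (p.1 ++ [nb], p.2 ++ [nb]))
        ([dealer], [dealer])).1
      (((PySem.Dict.ofList adj).getD dealer [] : List Int).foldl
        (fun (p : List Int × List Int) nb => if p.2.contains nb then p else (p.1 ++ [nb], p.2 ++ [nb]))
        ([dealer], [dealer])).2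
      []
      (by rw [hq]; simp)
      hnd0
      (fun x hx => by
        rcases hmem0 x hx with h | h
        · exact Or.inl (by simpa using h)
        · exact hWnb x h)
      (c0_keys _ hKnd)
      (by intro v; rw [c0_getD]; simp [wdeg_nil])
      (by
        intro v hv
        rw [wdeg_nil]
        calc ((0 : Nat) : Int) < 1 := by norm_num
          _ ≤ max m 1 := le_max_right m 1)
      (fun x hx => by
        rcases hmem0 x hx with h | h
        · exact (by simpa using h : x = dealer) ▸ hTd
        · exact hTn x h)
      (by
        have h1 : (dealer :: (PySem.Dict.ofList adj).keys).dedup.length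
            ≤ (dealer :: (PySem.Dict.ofList adj).keys).length := (List.dedup_sublist _).length_le
        have h2 : (PySem.Dict.ofList adj).keys.length = (PySem.Dict.ofList adj).size := by
          simp [PySem.Dict.keys, PySem.Dict.size]
        simp only [List.length_cons, List.length_nil] at h1 ⊢
        omega)
  refine ⟨e', ?_, hnd',
    hsub' dealer (hsub0 dealer (List.mem_singleton.2 rfl)),
    fun x hx => hsub' x (hnbsub x hx), hW', hcmp', hT'⟩
  rw [mlex]
  rw [hloop]

-- a nodup closed superset always exists, so mlex is some within Pre_
lemma mlex_exists (adj : List (Int × List Int)) (dealer m : Int)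
    (hG : GoodD (PySem.Dict.ofList adj)) :
    ∃ E : List Int,
      mlex adj dealer m = some (decide (E.length = (PySem.Dict.ofList adj).size)) ∧
      E.Nodup ∧ dealer ∈ E ∧
      (∀ x ∈ ((PySem.Dict.ofList adj).getD dealer [] : List Int), x ∈ E) ∧
      (∀ x ∈ E, x = dealer ∨ x ∈ (PySem.Dict.ofList adj).keys) ∧
      (∀ v, v ∉ E → (wdeg (PySem.Dict.ofList adj) E v : Int) < max m 1) := by
  obtain ⟨E, h1, h2, h3, h4, h5, h6, _⟩ :=
    mlex_spec adj dealer m hG (PySem.Set.ofList (dealer :: (PySem.Dict.ofList adj).keys))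
      ((PySem.Set.mem_ofList _ _).2 List.mem_cons_self)
      (by
        intro x hx
        rw [PySem.Set.mem_ofList]
        by_cases hdk : dealer ∈ (PySem.Dict.ofList adj).keys
        · exact List.mem_cons_of_mem _ (hG dealer hdk x hx)
        · rw [getD_of_not_key _ dealer hdk] at hx; cases hx)
      (by
        intro v hv
        have h1 : (1 : Int) ≤ (wdeg (PySem.Dict.ofList adj) (PySem.Set.ofList (dealer :: (PySem.Dict.ofList adj).keys)) v : Int) :=
          le_trans (le_max_right m 1) hv
        have h2 : 1 ≤ wdeg (PySem.Dict.ofList adj) (PySem.Set.ofList (dealer :: (PySem.Dict.ofList adj).keys)) v := by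
          exact_mod_cast h1
        obtain ⟨u, hu, hvu⟩ := wdeg_pos _ _ _ h2
        rw [PySem.Set.mem_ofList] at hu
        rw [PySem.Set.mem_ofList]
        rcases List.mem_cons.1 hu with h | h
        · by_cases hdk : dealer ∈ (PySem.Dict.ofList adj).keys
          · exact List.mem_cons_of_mem _ (hG dealer hdk v (h ▸ hvu))
          · rw [h, getD_of_not_key _ dealer hdk] at hvu; cases hvu
        · exact List.mem_cons_of_mem _ (hG u h v hvu))
  exact ⟨E, h1, h2, h3, h4, h5, h6⟩

lemma mlex_nokey (adj : List (Int × List Int)) (dealer m : Int)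
    (h : dealer ∉ (PySem.Dict.ofList adj).keys) :
    mlex adj dealer m = some (decide (1 = (PySem.Dict.ofList adj).size)) := by
  have hnb : (PySem.Dict.ofList adj).getD dealer [] = ([] : List Int) :=
    getD_of_not_key _ dealer h
  rw [mlex, hnb]
  simp only [List.length_nil, List.foldl_nil]
  have harith : 1 + 0 + (PySem.Dict.ofList adj).size = (PySem.Dict.ofList adj).size + 1 := by
    omega
  rw [harith]
  have hrun : mlexLoop (PySem.Dict.ofList adj) m ((PySem.Dict.ofList adj).size + 1)
      (List.foldl (fun c v => c.insert v 0) PySem.Dict.empty (PySem.Dict.ofList adj).keys,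
        [dealer], [dealer])
      = some (List.foldl (fun c v => c.insert v 0) PySem.Dict.empty (PySem.Dict.ofList adj).keys,
        [], [dealer]) := by
    simp only [mlexLoop, hnb, mlexInner]
  rw [hrun]
  rfl

-- monotonicity ------------------------------------------------------------

lemma mlex_mono (adj : List (Int × List Int)) (dealer m : Int)
    (hG : GoodD (PySem.Dict.ofList adj))
    (h : mlex adj dealer (m + 1) = some true) : mlex adj dealer m = some true := by
  by_cases hdk : dealer ∈ (PySem.Dict.ofList adj).keys
  · have hKnd : (PySem.Dict.ofList adj).keys.Nodup := PySem.Dict.nodup_keys_ofList adj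
    have hKlen : (PySem.Dict.ofList adj).keys.length = (PySem.Dict.ofList adj).size := by
      simp [PySem.Dict.keys, PySem.Dict.size]
    obtain ⟨E₀, hE0eq, hE0nd, hE0d, hE0nb, hE0W, hE0cl⟩ := mlex_exists adj dealer m hG
    obtain ⟨E₁, hE1eq, hE1nd, _, _, hE1W, _, hE1T⟩ :=
      mlex_spec adj dealer (m + 1) hG E₀ hE0d hE0nb
        (by
          intro v hv
          by_contra hvE
          have h1 := hE0cl v hvE
          have h2 : (max m 1 : Int) ≤ max (m + 1) 1 := max_le_max (by omega) le_rfl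
          omega)
    have hlen1 : E₁.length = (PySem.Dict.ofList adj).size := by
      have h1 := h.symm.trans hE1eq
      simpa using h1
    have hE1K : E₁ ⊆ (PySem.Dict.ofList adj).keys := by
      intro x hx
      rcases hE1W x hx with h1 | h1
      · exact h1 ▸ hdk
      · exact h1
    have hKE1 : (PySem.Dict.ofList adj).keys ⊆ E₁ :=
      nodup_subset_length_ge hE1nd hKnd hE1K (by omega)
    have hE0K : E₀ ⊆ (PySem.Dict.ofList adj).keys := by
      intro x hx
      rcases hE0W x hx with h1 | h1
      · exact h1 ▸ hdk
      · exact h1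
    have hKE0 : (PySem.Dict.ofList adj).keys ⊆ E₀ := fun x hx => hE1T x (hKE1 hx)
    have hle1 : E₀.length ≤ (PySem.Dict.ofList adj).keys.length := by
      have := nodup_subset_length hE0nd hE0K
      rwa [List.Nodup.dedup hKnd] at this
    have hle2 : (PySem.Dict.ofList adj).keys.length ≤ E₀.length := by
      have := nodup_subset_length hKnd hKE0
      rwa [List.Nodup.dedup hE0nd] at this
    rw [hE0eq]
    have : E₀.length = (PySem.Dict.ofList adj).size := by omega
    simp [this]
  · rw [mlex_nokey adj dealer m hdk]
    rw [mlex_nokey adj dealer (m + 1) hdk] at h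
    exact h

-- B's saturation pass -----------------------------------------------------

lemma satPass_spec (D : PySem.Dict Int (List Int)) (m : Int) :
    ∀ (vs : List Int) (S : PySem.Set Int) (g : Bool), S.Nodup →
      ∃ new : List Int,
        satPass D m vs (S, g) = (S ++ new, if new.isEmpty then g else true) ∧
        (S ++ new).Nodup ∧
        (∀ x ∈ new, x ∈ vs ∧ x ∉ S) ∧
        (new = [] → ∀ v ∈ vs, v ∉ S → bwdeg D S v < m) ∧
        (∀ T : List Int, (∀ x ∈ S, x ∈ T) →
          (∀ v, m ≤ (wdeg D T v : Int) → v ∈ T) → ∀ x ∈ new, x ∈ T) := by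
  intro vs
  induction vs with
  | nil =>
    intro S g hS
    exact ⟨[], by simp [satPass], by simpa using hS, by simp, by simp, by simp⟩
  | cons v vs ih =>
    intro S g hS
    by_cases hc : S.contains v = false ∧ m ≤ bwdeg D S v
    · have hvS : v ∉ S := by
        have := hc.1
        simpa using this
      have hadd : PySem.Set.add S v = S ++ [v] := PySem.Set.add_of_not_mem hvS
      have hS' : (S ++ [v]).Nodup := by
        rw [List.nodup_append]
        refine ⟨hS, List.nodup_singleton v, ?_⟩
        intro a ha b hb
        rw [List.mem_singleton] at hb
        exact fun hab => hvS ((hab.trans hb) ▸ ha)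
      obtain ⟨new', heq, hnd, hmem, _, hmin⟩ := ih (S ++ [v]) true hS'
      refine ⟨v :: new', ?_, ?_, ?_, ?_, ?_⟩
      · show satPass D m (v :: vs) (S, g) = _
        rw [satPass, if_pos hc, hadd, heq]
        simp
      · simpa using hnd
      · intro x hx
        rcases List.mem_cons.1 hx with hx | hx
        · subst hx; exact ⟨List.mem_cons_self, hvS⟩
        · obtain ⟨h1, h2⟩ := hmem x hx
          exact ⟨List.mem_cons_of_mem _ h1, fun hxS => h2 (List.mem_append.2 (Or.inl hxS))⟩
      · intro hcontra; cases hcontra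
      · intro T hST hTcl x hx
        have hvT : v ∈ T := by
          apply hTcl
          have h1 : m ≤ (wdeg D S v : Int) := by rw [← bwdeg_eq]; exact hc.2
          have h2 : wdeg D S v ≤ wdeg D T v := wdeg_mono D v hS hST
          have h3 : ((wdeg D S v : Nat) : Int) ≤ ((wdeg D T v : Nat) : Int) := by
            exact_mod_cast h2
          omega
        rcases List.mem_cons.1 hx with hx | hx
        · exact hx ▸ hvT
        · refine hmin T ?_ hTcl x hx
          intro y hy
          rcases List.mem_append.1 hy with hy | hy
          · exact hST y hy
          · rw [List.mem_singleton] at hy; exact hy ▸ hvT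
    · obtain ⟨new', heq, hnd, hmem, hclosed, hmin⟩ := ih S g hS
      refine ⟨new', ?_, hnd, ?_, ?_, hmin⟩
      · show satPass D m (v :: vs) (S, g) = _
        rw [satPass, if_neg hc]
        exact heq
      · intro x hx
        obtain ⟨h1, h2⟩ := hmem x hx
        exact ⟨List.mem_cons_of_mem _ h1, h2⟩
      · intro hnil w hw hwS
        rcases List.mem_cons.1 hw with hw | hw
        · subst hw
          by_contra hge
          apply hc
          constructor
          · simpa using hwS
          · omega
        · exact hclosed hnil w hw hwS

-- B's while-grown loop ----------------------------------------------------

lemma satLoop_spec (D : PySem.Dict Int (List Int)) (m : Int) :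
    ∀ (fuel : Nat) (S : PySem.Set Int), S.Nodup →
      (D.keys.filter (fun k => decide (k ∉ S))).length < fuel →
      (satLoop D m fuel S).Nodup ∧
      (∀ x ∈ S, x ∈ satLoop D m fuel S) ∧
      (∀ x ∈ satLoop D m fuel S, x ∈ S ∨ x ∈ D.keys) ∧
      (∀ v ∈ D.keys, v ∉ satLoop D m fuel S → bwdeg D (satLoop D m fuel S) v < m) ∧
      (∀ T : List Int, (∀ x ∈ S, x ∈ T) →
        (∀ v, m ≤ (wdeg D T v : Int) → v ∈ T) → ∀ x ∈ satLoop D m fuel S, x ∈ T) := by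
  intro fuel
  induction fuel with
  | zero =>
    intro S hS hfuel
    omega
  | succ fuel ih =>
    intro S hS hfuel
    obtain ⟨new, heq, hnd, hmem, hclosed, hmin⟩ := satPass_spec D m D.keys S false hS
    cases hnew : new with
    | nil =>
      subst hnew
      have hres : satLoop D m (fuel + 1) S = S := by
        rw [satLoop, heq]
        simp
      rw [hres]
      refine ⟨hS, fun x hx => hx, fun x hx => Or.inl hx, ?_, fun T hST _ x hx => hST x hx⟩
      intro v hv hvS
      exact hclosed rfl v hv hvS
    | cons w ws =>
      have hne : ¬ new.isEmpty := by rw [hnew]; simp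
      have hres : satLoop D m (fuel + 1) S = satLoop D m fuel (S ++ new) := by
        rw [satLoop, heq]
        simp only [hne, if_neg, Bool.if_false_right]
        rw [if_neg (by simp [hnew])]
      have hfuel' : (D.keys.filter (fun k => decide (k ∉ S ++ new))).length < fuel := by
        have hsl : (D.keys.filter (fun k => decide (k ∉ S ++ new))).Sublist
            (D.keys.filter (fun k => decide (k ∉ S))) := by
          apply List.monotone_filter_right
          intro a ha
          simp only [decide_eq_true_eq] at ha ⊢
          exact fun haS => ha (List.mem_append.2 (Or.inl haS))
        have hlen := hsl.length_le
        have hwk : w ∈ D.keys.filter (fun k => decide (k ∉ S)) := by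
          rw [List.mem_filter]
          obtain ⟨h1, h2⟩ := hmem w (by rw [hnew]; exact List.mem_cons_self)
          exact ⟨h1, by simpa using h2⟩
        have hwk2 : w ∉ D.keys.filter (fun k => decide (k ∉ S ++ new)) := by
          rw [List.mem_filter]
          rintro ⟨-, h2⟩
          simp only [decide_eq_true_eq] at h2
          exact h2 (List.mem_append.2 (Or.inr (by rw [hnew]; exact List.mem_cons_self)))
        have hne2 : (D.keys.filter (fun k => decide (k ∉ S ++ new))).length ≠
            (D.keys.filter (fun k => decide (k ∉ S))).length := by
          intro hl
          have := hsl.eq_of_length hl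
          rw [this] at hwk2
          exact hwk2 hwk
        omega
      obtain ⟨ih1, ih2, ih3, ih4, ih5⟩ := ih (S ++ new) hnd hfuel'
      rw [hres]
      refine ⟨ih1, ?_, ?_, ih4, ?_⟩
      · intro x hx
        exact ih2 x (List.mem_append.2 (Or.inl hx))
      · intro x hx
        rcases ih3 x hx with h1 | h1
        · rcases List.mem_append.1 h1 with h2 | h2
          · exact Or.inl h2
          · exact Or.inr (hmem x h2).1
        · exact Or.inr h1
      · intro T hST hTcl x hx
        refine ih5 T ?_ hTcl x hx
        intro y hy
        rcases List.mem_append.1 hy with hy | hy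
        · exact hST y hy
        · exact hmin T hST hTcl y hy

-- B's check equals A's check for m ≥ 1 ------------------------------------

lemma reachesAll_eq (adj : List (Int × List Int)) (dealer m : Int) (hm : 1 ≤ m)
    (hPre : dealer ∉ (PySem.Dict.ofList adj).keys ∨ GoodD (PySem.Dict.ofList adj)) :
    mlex adj dealer m = some (reachesAll adj dealer m) := by
  have hmax : max m 1 = m := max_eq_left hm
  by_cases hdk : dealer ∈ (PySem.Dict.ofList adj).keys
  · have hG : GoodD (PySem.Dict.ofList adj) := by
      rcases hPre with h | h
      · exact absurd hdk h
      · exact h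
    -- B's starting set
    have hnb0 : ∀ x ∈ ((PySem.Dict.ofList adj).getD dealer [] : List Int),
        x ∈ (PySem.Dict.ofList adj).keys := hG dealer hdk
    have hS0nd : (PySem.Set.update [dealer] ((PySem.Dict.ofList adj).getD dealer []) : List Int).Nodup :=
      PySem.Set.nodup_update _ _ (List.nodup_singleton dealer)
    have hS0mem : ∀ x, x ∈ (PySem.Set.update [dealer] ((PySem.Dict.ofList adj).getD dealer []) : List Int) ↔
        x = dealer ∨ x ∈ ((PySem.Dict.ofList adj).getD dealer [] : List Int) := by
      intro x
      rw [PySem.Set.mem_update]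
      simp
    obtain ⟨hS'nd, hS'sup, hS'sub, hS'cl, hS'min⟩ :=
      satLoop_spec (PySem.Dict.ofList adj) m ((PySem.Dict.ofList adj).size + 1)
        (PySem.Set.update [dealer] ((PySem.Dict.ofList adj).getD dealer [])) hS0nd
        (by
          have h1 : ((PySem.Dict.ofList adj).keys.filter (fun k => decide (k ∉ (PySem.Set.update [dealer] ((PySem.Dict.ofList adj).getD dealer []) : List Int)))).length ≤ (PySem.Dict.ofList adj).keys.length :=
            List.filter_sublist.length_le
          have h2 : (PySem.Dict.ofList adj).keys.length = (PySem.Dict.ofList adj).size := by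
            simp [PySem.Dict.keys, PySem.Dict.size]
          omega)
    set S' := satLoop (PySem.Dict.ofList adj) m ((PySem.Dict.ofList adj).size + 1)
      (PySem.Set.update [dealer] ((PySem.Dict.ofList adj).getD dealer [])) with hS'def
    -- S' is closed for ALL v (not only keys)
    have hS'clAll : ∀ v, (max m 1 : Int) ≤ (wdeg (PySem.Dict.ofList adj) S' v : Int) → v ∈ S' := by
      intro v hv
      rw [hmax] at hv
      by_contra hvS
      by_cases hvK : v ∈ (PySem.Dict.ofList adj).keys
      · have := hS'cl v hvK hvS
        rw [bwdeg_eq] at this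
        omega
      · have h1 : 1 ≤ wdeg (PySem.Dict.ofList adj) S' v := by
          have : (1 : Int) ≤ (wdeg (PySem.Dict.ofList adj) S' v : Int) := by omega
          exact_mod_cast this
        obtain ⟨u, hu, hvu⟩ := wdeg_pos _ _ _ h1
        rcases hS'sub u hu with h2 | h2
        · rcases (hS0mem u).1 h2 with h3 | h3
          · exact hvK (hG dealer hdk v (h3 ▸ hvu))
          · exact hvK (hG u (hnb0 u h3) v hvu)
        · exact hvK (hG u h2 v hvu)
    -- A's set E with E ⊆ S'
    obtain ⟨E, hEeq, hEnd, hEd, hEnb, hEW, hEcl, hES'⟩ :=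
      mlex_spec adj dealer m hG S'
        (hS'sup dealer ((hS0mem dealer).2 (Or.inl rfl)))
        (fun x hx => hS'sup x ((hS0mem x).2 (Or.inr hx)))
        hS'clAll
    -- S' ⊆ E
    have hS'E : ∀ x ∈ S', x ∈ E := by
      apply hS'min
      · intro y hy
        rcases (hS0mem y).1 hy with h1 | h1
        · exact h1 ▸ hEd
        · exact hEnb y h1
      · intro v hv
        by_contra hvE
        have := hEcl v hvE
        rw [hmax] at this
        omega
    have hlen : S'.length = E.length :=
      nodup_mutual_length hS'nd hEnd hS'E hES'
    rw [hEeq, reachesAll]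
    simp only [← hS'def]
    rw [hlen]
  · -- dealer is not a key: A's set is {dealer} and so is B's
    have hnb : (PySem.Dict.ofList adj).getD dealer [] = ([] : List Int) :=
      getD_of_not_key _ dealer hdk
    rw [mlex_nokey adj dealer m hdk]
    congr 1
    have hS0 : (PySem.Set.update [dealer] ((PySem.Dict.ofList adj).getD dealer []) : List Int) = [dealer] := by
      rw [hnb]
      rfl
    obtain ⟨hS'nd, hS'sup, _, _, hS'min⟩ :=
      satLoop_spec (PySem.Dict.ofList adj) m ((PySem.Dict.ofList adj).size + 1)
        (PySem.Set.update [dealer] ((PySem.Dict.ofList adj).getD dealer []))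
        (by rw [hS0]; exact List.nodup_singleton dealer)
        (by
          have h1 : ((PySem.Dict.ofList adj).keys.filter (fun k => decide (k ∉ (PySem.Set.update [dealer] ((PySem.Dict.ofList adj).getD dealer []) : List Int)))).length ≤ (PySem.Dict.ofList adj).keys.length :=
            List.filter_sublist.length_le
          have h2 : (PySem.Dict.ofList adj).keys.length = (PySem.Dict.ofList adj).size := by
            simp [PySem.Dict.keys, PySem.Dict.size]
          omega)
    set S' := satLoop (PySem.Dict.ofList adj) m ((PySem.Dict.ofList adj).size + 1)
      (PySem.Set.update [dealer] ((PySem.Dict.ofList adj).getD dealer [])) with hS'def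
    -- S' ⊆ [dealer] since [dealer] is closed when m ≥ 1
    have hsub : ∀ x ∈ S', x ∈ ([dealer] : List Int) := by
      apply hS'min
      · intro y hy
        rw [hS0] at hy
        exact hy
      · intro v hv
        exfalso
        have h1 : 1 ≤ wdeg (PySem.Dict.ofList adj) [dealer] v := by
          have : (1 : Int) ≤ (wdeg (PySem.Dict.ofList adj) [dealer] v : Int) := by omega
          exact_mod_cast this
        obtain ⟨u, hu, hvu⟩ := wdeg_pos _ _ _ h1
        rw [List.mem_singleton] at hu
        rw [hu, hnb] at hvu
        cases hvu
    have hsup : dealer ∈ S' := hS'sup dealer (by rw [hS0]; exact List.mem_singleton.2 rfl)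
    have hlen : S'.length = 1 := by
      have := nodup_mutual_length hS'nd (List.nodup_singleton dealer) hsub
        (fun x hx => by rw [List.mem_singleton] at hx; exact hx ▸ hsup)
      simpa using this
    rw [reachesAll]
    simp only [← hS'def]
    rw [hlen]

-- scan / binary search against an abstract monotone predicate ---------------

def PGood (P : Int → Bool) (n r : Int) : Prop :=
  0 ≤ r ∧ r ≤ n ∧ (r = 0 ∨ P r = true) ∧ (r = n ∨ P (r + 1) = false)

lemma pdcl (P : Int → Bool) (mono : ∀ m, P (m + 1) = true → P m = true) :
    ∀ (k : Nat) (a : Int), P (a + k) = true → P a = true := by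
  intro k
  induction k with
  | zero => intro a h; simpa using h
  | succ k ih =>
    intro a h
    have harg : a + ((k + 1 : Nat) : Int) = (a + (k : Nat)) + 1 := by push_cast; ring
    rw [harg] at h
    exact ih a (mono _ h)

lemma pgood_uniq (P : Int → Bool) (n : Int)
    (mono : ∀ m, P (m + 1) = true → P m = true)
    {r s : Int} (hr : PGood P n r) (hs : PGood P n s) : r = s := by
  have aux : ∀ r s : Int, PGood P n r → PGood P n s → r < s → False := by
    intro r s hr hs hlt
    obtain ⟨hr0, hrn, hrp, hrb⟩ := hr
    obtain ⟨hs0, hsn, hsp, hsb⟩ := hs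
    have hPs : P s = true := by
      rcases hsp with h | h
      · omega
      · exact h
    have hPr1 : P (r + 1) = true := by
      have harg : (r + 1) + (((s - (r + 1)).toNat : Nat) : Int) = s := by
        rw [Int.toNat_of_nonneg (by omega)]; ring
      exact pdcl P mono _ _ (by rw [harg]; exact hPs)
    rcases hrb with h | h
    · omega
    · rw [hPr1] at h; cases h
  rcases lt_trichotomy r s with h | h | h
  · exact absurd (aux r s hr hs h) (by simp)
  · exact h
  · exact absurd (aux s r hs hr h) (by simp)

lemma scan_good (adj : List (Int × List Int)) (dealer : Int) (P : Int → Bool) (n : Int)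
    (hn : 0 ≤ n) (hP : ∀ m, mlex adj dealer m = some (P m))
    (mono : ∀ m, P (m + 1) = true → P m = true) :
    ∀ (fuel : Nat) (a last : Int), (n + 1 - a).toNat ≤ fuel → 0 ≤ a → a ≤ n + 1 →
      ((a = 0 ∧ last = 0) ∨ (0 < a ∧ last = a - 1 ∧ ∀ k, 0 ≤ k → k < a → P k = true)) →
      PGood P n (computeKScan adj dealer (PySem.List.pyRange a (n + 1) 1) last) := by
  intro fuel
  induction fuel with
  | zero =>
    intro a last hfuel ha0 han hinv
    have ha : a = n + 1 := by omega
    have hemp : PySem.List.pyRange a (n + 1) 1 = [] := by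
      simp [PySem.List.pyRange]; omega
    rw [hemp, computeKScan]
    rcases hinv with ⟨h1, h2⟩ | ⟨h1, h2, h3⟩
    · omega
    · refine ⟨by omega, by omega, ?_, Or.inl (by omega)⟩
      by_cases hn0 : n = 0
      · exact Or.inl (by omega)
      · refine Or.inr ?_
        have : last = n := by omega
        rw [this]
        exact h3 n (by omega) (by omega)
  | succ fuel ih =>
    intro a last hfuel ha0 han hinv
    by_cases hab : a < n + 1
    · rw [PySem.List.pyRange_one_cons hab, computeKScan, hP a]
      cases hpa : P a
      · show PGood P n last
        rcases hinv with ⟨h1, h2⟩ | ⟨h1, h2, h3⟩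
        · refine ⟨by omega, by omega, Or.inl h2, ?_⟩
          by_cases hn0 : n = 0
          · exact Or.inl (by omega)
          · refine Or.inr ?_
            rw [h2]
            cases hq : P (0 + 1)
            · rfl
            · exfalso
              have hm := mono 0 hq
              rw [h1] at hpa
              rw [hm] at hpa
              cases hpa
        · refine ⟨by omega, by omega, ?_, ?_⟩
          · by_cases hl0 : last = 0
            · exact Or.inl hl0
            · exact Or.inr (h3 last (by omega) (by omega))
          · refine Or.inr ?_
            have : last + 1 = a := by omega
            rw [this]
            exact hpa
      · show PGood P n (computeKScan adj dealer (PySem.List.pyRange (a + 1) (n + 1) 1) a)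
        refine ih (a + 1) a (by omega) (by omega) (by omega) ?_
        refine Or.inr ⟨by omega, by ring, ?_⟩
        intro k hk0 hka
        by_cases hke : k = a
        · rw [hke]; exact hpa
        · rcases hinv with ⟨h1, h2⟩ | ⟨h1, h2, h3⟩
          · omega
          · exact h3 k hk0 (by omega)
    · have ha : a = n + 1 := by omega
      have hemp : PySem.List.pyRange a (n + 1) 1 = [] := by
        simp [PySem.List.pyRange]; omega
      rw [hemp, computeKScan]
      rcases hinv with ⟨h1, h2⟩ | ⟨h1, h2, h3⟩
      · omega
      · refine ⟨by omega, by omega, ?_, Or.inl (by omega)⟩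
        by_cases hn0 : n = 0
        · exact Or.inl (by omega)
        · refine Or.inr ?_
          have : last = n := by omega
          rw [this]
          exact h3 n (by omega) (by omega)

lemma bin_good (adj : List (Int × List Int)) (dealer : Int) (P : Int → Bool) (n : Int)
    (hQ : ∀ m, 1 ≤ m → reachesAll adj dealer m = P m) :
    ∀ (fuel : Nat) (lo hi ans : Int), (hi + 1 - lo).toNat ≤ fuel →
      1 ≤ lo → lo ≤ hi + 1 → hi ≤ n → ans = lo - 1 →
      (ans = 0 ∨ P ans = true) → (hi = n ∨ P (hi + 1) = false) →
      PGood P n (computeKBin adj dealer lo hi ans) := by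
  intro fuel
  induction fuel with
  | zero =>
    intro lo hi ans hfuel hlo1 hlohi hhin hans hansP hbnd
    have hgt : ¬ lo ≤ hi := by omega
    rw [computeKBin, dif_neg hgt]
    have : ans = hi := by omega
    exact ⟨by omega, by omega, hansP, this ▸ hbnd⟩
  | succ fuel ih =>
    intro lo hi ans hfuel hlo1 hlohi hhin hans hansP hbnd
    by_cases hlh : lo ≤ hi
    · have hmid := PySem.Int.floordiv_two_mid_bounds hlh
      have hm1 : 1 ≤ PySem.Int.floordiv (lo + hi) 2 := by omega
      rw [computeKBin, dif_pos hlh]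
      simp only [hQ (PySem.Int.floordiv (lo + hi) 2) hm1]
      cases hpm : P (PySem.Int.floordiv (lo + hi) 2)
      · rw [if_neg (by simp [hpm])]
        show PGood P n (computeKBin adj dealer lo (PySem.Int.floordiv (lo + hi) 2 - 1) ans)
        refine ih lo (PySem.Int.floordiv (lo + hi) 2 - 1) ans (by omega) hlo1 (by omega)
          (by omega) hans hansP ?_
        refine Or.inr ?_
        have : PySem.Int.floordiv (lo + hi) 2 - 1 + 1 = PySem.Int.floordiv (lo + hi) 2 := by
          ring
        rw [this]
        exact hpm
      · rw [if_pos (by simp [hpm])]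
        show PGood P n (computeKBin adj dealer (PySem.Int.floordiv (lo + hi) 2 + 1) hi
          (PySem.Int.floordiv (lo + hi) 2))
        refine ih (PySem.Int.floordiv (lo + hi) 2 + 1) hi (PySem.Int.floordiv (lo + hi) 2)
          (by omega) (by omega) (by omega) hhin (by ring) ?_ hbnd
        refine Or.inr ?_
        exact hpm
    · rw [computeKBin, dif_neg hlh]
      have : ans = hi := by omega
      exact ⟨by omega, by omega, hansP, this ▸ hbnd⟩

-- ===== VERDICT (by name: the statement is the Claim_ definition above) =====
theorem compute_K_spec : Claim_equal_compute_K := by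
  intro adj dealer hDom hPre
  unfold Spec_compute_K
  have hdkOr : dealer ∉ (PySem.Dict.ofList adj).keys ∨ GoodD (PySem.Dict.ofList adj) := by
    rcases hPre with hnk | hall
    · left
      rw [keys_ofList_mem]
      intro hc
      obtain ⟨p, hp, hb⟩ := List.mem_map.1 hc
      have h2 : adj.any (fun p => p.1 == dealer) = true :=
        List.any_eq_true.2 ⟨p, hp, by simpa using hb⟩
      rw [h2] at hnk; cases hnk
    · exact Or.inr (pre_goodD adj dealer hall)
  have hP : ∀ m : Int, mlex adj dealer m = some ((mlex adj dealer m).getD false) := by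
    intro m
    rcases hdkOr with hdk | hG
    · rw [mlex_nokey adj dealer m hdk]; rfl
    · obtain ⟨E, hE, _⟩ := mlex_exists adj dealer m hG
      rw [hE]; rfl
  have hmono : ∀ m : Int, (mlex adj dealer (m + 1)).getD false = true →
      (mlex adj dealer m).getD false = true := by
    intro m hm
    rcases hdkOr with hdk | hG
    · rw [mlex_nokey adj dealer m hdk]
      rw [mlex_nokey adj dealer (m + 1) hdk] at hm
      exact hm
    · have h1 : mlex adj dealer (m + 1) = some true := by
        rw [hP (m + 1)]; exact congrArg some hm
      have h2 := mlex_mono adj dealer m hG h1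
      rw [h2]; rfl
  have hQ : ∀ m : Int, 1 ≤ m →
      reachesAll adj dealer m = (mlex adj dealer m).getD false := by
    intro m hm
    have h1 := reachesAll_eq adj dealer m hm hdkOr
    rw [h1]
    rfl
  have hn : (0 : Int) ≤ ((PySem.Dict.ofList adj).size : Int) := by positivity
  have h1 : PGood (fun m => (mlex adj dealer m).getD false)
      ((PySem.Dict.ofList adj).size : Int) (compute_K adj dealer) := by
    rw [compute_K]
    exact scan_good adj dealer _ _ hn hP hmono
      (((PySem.Dict.ofList adj).size : Int) + 1 - 0).toNat 0 0 (by omega) (by omega) (by omega)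
      (Or.inl ⟨rfl, rfl⟩)
  have h2 : PGood (fun m => (mlex adj dealer m).getD false)
      ((PySem.Dict.ofList adj).size : Int) (compute_K_alt adj dealer) := by
    rw [compute_K_alt]
    exact bin_good adj dealer _ _ hQ
      (((PySem.Dict.ofList adj).size : Int) + 1 - 1).toNat 1 ((PySem.Dict.ofList adj).size : Int) 0
      (by omega) (by omega) (by omega) (by omega) (by omega) (Or.inl rfl) (Or.inl rfl)
  exact pgood_uniq _ _ hmono h1 h2
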